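-- pv_equiv track=rewrite | github.com/SUTDMEC/NSE_Validation | NSE_Analytics_pilot_testing/SmoothingHeuristic.py | consecutive_modes
-- ===== SOURCE A (Python) =====
-- def consecutive_modes(modes):
--     """Generator function to identify sequences of consecutive
--     modes. Input is the list of modes. Yields a tuples of the
--     start and end index of a consecutive mode.
--
--     """
--     start_index = 0
--     last_mode = modes[0]
--     for index, mode in enumerate(modes):
--         if mode != last_mode:
--             yield(start_index, index)
--             start_index = index
--             last_mode = mode
--     yield (start_index, len(modes))
-- ===== SOURCE B (Python) =====
-- def consecutive_modes(modes):
--     """Generator yielding (start, end) for each maximal run of equal modes,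
--     using two pointers that jump run-by-run: the inner loop advances `end`
--     to the end of the current run, the outer loop jumps `start` to it."""
--     n = len(modes)
--     start = 0
--     while start < n:
--         end = start + 1
--         while end < n and modes[end] == modes[start]:
--             end += 1
--         yield (start, end)
--         start = end
-- ===== Notes on version B (the rewrite author's own statement) =====
-- stated objective: alternative
-- what changed: B abandons A's element-by-element enumerate scan with last_mode/start_index state for a two-pointer run-skipping loop: an inner while advances the end pointer to the end of the current run, the outer while jumps the start pointer from run to run, yielding each run directly.
import Mathlib
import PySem

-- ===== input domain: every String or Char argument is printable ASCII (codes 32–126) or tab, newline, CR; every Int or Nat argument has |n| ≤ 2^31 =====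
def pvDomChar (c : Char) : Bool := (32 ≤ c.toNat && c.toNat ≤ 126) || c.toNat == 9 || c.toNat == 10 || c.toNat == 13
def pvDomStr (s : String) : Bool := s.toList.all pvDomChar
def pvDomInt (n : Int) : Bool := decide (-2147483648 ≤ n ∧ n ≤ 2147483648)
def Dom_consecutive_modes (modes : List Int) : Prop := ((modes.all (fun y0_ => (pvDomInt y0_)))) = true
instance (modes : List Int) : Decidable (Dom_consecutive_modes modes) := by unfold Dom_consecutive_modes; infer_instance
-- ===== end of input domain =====

-- B replaces A's stateful enumerate scan by a two-pointer run-skipping loop (objective: alternative).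

-- ===== PORT A =====
-- A's loop step: state (start_index, last_mode, yielded so far), input (index, mode)
def stepA (st : Int × Int × List (Int × Int)) (p : Int × Int) : Int × Int × List (Int × Int) :=
  if p.2 ≠ st.2.1 then (p.1, p.2, st.2.2 ++ [(st.1, p.1)]) else st

-- literal port of A (a generator; the list of yielded pairs); modes[0] raises on [] → Pre_
def consecutive_modes (modes : List Int) : List (Int × Int) :=
  match modes with
  | [] => []  -- Python raises IndexError here; excluded by Pre_consecutive_modes
  | m0 :: _ =>
    let st := (PySem.List.enumerate modes 0).foldl stepA (0, m0, ([] : List (Int × Int)))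
    st.2.2 ++ [(st.1, (modes.length : Int))]

-- ===== PORT B =====
-- B's inner while: advance e while e < n and modes[e] == modes[start]
def runEnd (modes : List Int) (s : Nat) (e : Nat) : Nat :=
  if e < modes.length ∧ modes[e]? = modes[s]? then runEnd modes s (e + 1) else e
termination_by modes.length - e
decreasing_by omega

-- the inner while never moves `end` backwards (cited by runsFrom's termination)
lemma runEnd_ge (modes : List Int) (s e : Nat) : e ≤ runEnd modes s e := by
  unfold runEnd
  split
  · exact Nat.le_trans (Nat.le_succ e) (runEnd_ge modes s (e + 1))
  · exact Nat.le_refl e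
termination_by modes.length - e
decreasing_by omega

-- B's outer while: emit the run [start, end) and jump start to end
def runsFrom (modes : List Int) (start : Nat) : List (Int × Int) :=
  if h : start < modes.length then
    let e := runEnd modes start (start + 1)
    ((start : Int), (e : Int)) :: runsFrom modes e
  else []
termination_by modes.length - start
decreasing_by have := runEnd_ge modes start (start + 1); omega

-- literal port of B
def consecutive_modes_alt (modes : List Int) : List (Int × Int) :=
  runsFrom modes 0

-- ===== PRECONDITION & SPEC =====
-- A raises IndexError on the empty list (unconditional modes[0]); excluded.
def Pre_consecutive_modes (modes : List Int) : Prop := modes ≠ []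
instance (modes : List Int) : Decidable (Pre_consecutive_modes modes) := by unfold Pre_consecutive_modes; infer_instance
def pvWitness_consecutive_modes : List Int := [1, 1, 2]

def Spec_consecutive_modes (modes : List Int) (out : List (Int × Int)) : Prop := out = consecutive_modes_alt modes
instance (modes : List Int) (out : List (Int × Int)) : Decidable (Spec_consecutive_modes modes out) := by unfold Spec_consecutive_modes; infer_instance

-- ===== CLAIM (what is proved, stated in full; the proofs are below) =====
def Claim_equal_consecutive_modes : Prop := ∀ (modes : List Int), Dom_consecutive_modes modes → Pre_consecutive_modes modes → Spec_consecutive_modes modes (consecutive_modes modes)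

-- ===== LEMMAS AND PROOFS =====

-- proof-only common form: the runs of l, starting at absolute index j
def RS (j : Int) (l : List Int) : List (Int × Int) :=
  match l with
  | [] => []
  | m :: t =>
    let k := (t.takeWhile (· == m)).length
    (j, j + 1 + (k : Int)) :: RS (j + 1 + (k : Int)) (t.drop k)
termination_by l.length
decreasing_by simp

lemma RS_nil (j : Int) : RS j [] = [] := by
  rw [RS.eq_def]

lemma RS_cons (j : Int) (m : Int) (t : List Int) :
    RS j (m :: t) = (j, j + 1 + ((t.takeWhile (· == m)).length : Int)) ::
      RS (j + 1 + ((t.takeWhile (· == m)).length : Int)) (t.drop (t.takeWhile (· == m)).length) := by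
  rw [RS.eq_def]

-- A's fold, mid-run of value v started at s, current index i, characterised by RS
lemma A_char (l : List Int) (i s v : Int) (acc : List (Int × Int)) :
    (let st := (PySem.List.enumerate l i).foldl stepA (s, v, acc);
     st.2.2 ++ [(st.1, i + (l.length : Int))]) =
    acc ++ ((s, i + ((l.takeWhile (· == v)).length : Int)) ::
      RS (i + ((l.takeWhile (· == v)).length : Int)) (l.drop (l.takeWhile (· == v)).length)) := by
  induction l generalizing i s v acc with
  | nil => simp [PySem.List.enumerate, RS_nil]
  | cons m t ih =>
    by_cases hm : m = v
    · subst hm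
      have h1 := ih (i + 1) s m acc
      simp only [PySem.List.enumerate_cons, List.foldl_cons, stepA, ne_eq, not_true_eq_false,
        List.takeWhile_cons, BEq.rfl, if_true] at h1 ⊢
      simp only [List.length_cons, List.drop_succ_cons] at *
      have harith : i + 1 + ((t.takeWhile (· == m)).length : Int) =
          i + (((t.takeWhile (· == m)).length + 1 : Nat) : Int) := by push_cast; ring
      have harith2 : i + 1 + ((t.length : Nat) : Int) = i + ((t.length + 1 : Nat) : Int) := by
        push_cast; ring
      rw [← harith, ← harith2]
      exact h1
    · have h1 := ih (i + 1) i m (acc ++ [(s, i)])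
      simp only [PySem.List.enumerate_cons, List.foldl_cons, stepA, ne_eq, hm, not_false_eq_true,
        if_pos, List.takeWhile_cons] at h1 ⊢
      have hbeq : (m == v) = false := by simp [hm]
      rw [hbeq]
      simp only [Bool.false_eq_true, if_false, List.length_nil, Nat.cast_zero, add_zero,
        List.drop_zero]
      rw [RS_cons]
      have harith2 : i + 1 + ((t.length : Nat) : Int) = i + ((t.length + 1 : Nat) : Int) := by
        push_cast; ring
      simp only [List.length_cons]
      rw [← harith2]
      rw [h1]
      simp [List.append_assoc]

-- the inner while computes: initial e plus the length of the equal run from e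
lemma runEnd_char (modes : List Int) (s e : Nat) (v : Int) (hv : modes[s]? = some v) :
    runEnd modes s e = e + ((modes.drop e).takeWhile (· == v)).length := by
  unfold runEnd
  split
  · rename_i h
    obtain ⟨he, heq⟩ := h
    have hev : modes[e]? = some v := heq.trans hv
    have hgete : modes[e] = v := by
      have : modes[e]? = some modes[e] := List.getElem?_eq_getElem he
      rw [this] at hev; exact Option.some.inj hev
    have hdrop : modes.drop e = modes[e] :: modes.drop (e + 1) :=
      List.drop_eq_getElem_cons he
    rw [hdrop, List.takeWhile_cons, hgete]
    simp only [BEq.rfl, if_true]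
    rw [runEnd_char modes s (e + 1) v hv]
    simp; omega
  · rename_i h
    by_cases he : e < modes.length
    · have hne : modes[e]? ≠ modes[s]? := fun hc => h ⟨he, hc⟩
      have hgete : modes[e] ≠ v := by
        intro hc
        apply hne
        rw [List.getElem?_eq_getElem he, hc, hv]
      have hdrop : modes.drop e = modes[e] :: modes.drop (e + 1) :=
        List.drop_eq_getElem_cons he
      rw [hdrop, List.takeWhile_cons]
      have : (modes[e] == v) = false := by simp [hgete]
      rw [this]
      simp
    · have : modes.drop e = [] := List.drop_eq_nil_of_le (by omega)
      rw [this]; simp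
termination_by modes.length - e
decreasing_by omega

-- the outer while emits exactly the runs of the remaining suffix
lemma runsFrom_char (modes : List Int) (s : Nat) :
    runsFrom modes s = RS (s : Int) (modes.drop s) := by
  unfold runsFrom
  split
  · rename_i h
    have hv : modes[s]? = some modes[s] := List.getElem?_eq_getElem h
    have hdrop : modes.drop s = modes[s] :: modes.drop (s + 1) :=
      List.drop_eq_getElem_cons h
    have hre := runEnd_char modes s (s + 1) modes[s] hv
    rw [hdrop, RS_cons]
    have hge := runEnd_ge modes s (s + 1)
    have ih := runsFrom_char modes (runEnd modes s (s + 1))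
    show ((s : Int), ((runEnd modes s (s + 1) : Nat) : Int)) ::
        runsFrom modes (runEnd modes s (s + 1)) = _
    rw [ih, hre]
    have hdd : modes.drop (s + 1 + ((modes.drop (s + 1)).takeWhile (· == modes[s])).length)
        = (modes.drop (s + 1)).drop ((modes.drop (s + 1)).takeWhile (· == modes[s])).length := by
      rw [Nat.add_comm (s + 1), List.drop_drop]
      congr 1
      omega
    rw [hdd]
    push_cast
    ring_nf
  · rename_i h
    have : modes.drop s = [] := List.drop_eq_nil_of_le (by omega)
    rw [this, RS_nil]
termination_by modes.length - s
decreasing_by have := runEnd_ge modes s (s + 1); omega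

-- ===== VERDICT (by name: the statement is the Claim_ definition above) =====
theorem consecutive_modes_spec : Claim_equal_consecutive_modes := by
  intro modes _ hpre
  unfold Spec_consecutive_modes consecutive_modes consecutive_modes_alt
  cases modes with
  | nil => exact absurd rfl hpre
  | cons m0 rest =>
    have hA := A_char (m0 :: rest) 0 0 m0 []
    simp only [List.nil_append, zero_add] at hA
    show (List.foldl stepA (0, m0, []) (PySem.List.enumerate (m0 :: rest))).2.2 ++
        [((List.foldl stepA (0, m0, []) (PySem.List.enumerate (m0 :: rest))).1,
          ((m0 :: rest).length : Int))] = runsFrom (m0 :: rest) 0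
    rw [hA, runsFrom_char]
    simp only [List.drop_zero, Nat.cast_zero]
    rw [RS_cons]
    simp only [List.takeWhile_cons, BEq.rfl, if_true, List.length_cons, List.drop_succ_cons]
    congr 1
    · congr 1
      push_cast; ring
    · congr 1
      push_cast; ring
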